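-- pv_equiv track=rewrite | github.com/modbender/skill-library-mcp | skills/kb-search/kb_search.py | detect_doc_type
-- ===== SOURCE A (Python) =====
-- def detect_doc_type(filename: str) -> str:
--     """检测文档类型"""
--     filename_lower = filename.lower()
--
--     if any(kw in filename_lower for kw in ["error", "troubleshoot", "fix"]):
--         return "error"
--     elif any(kw in filename_lower for kw in ["config", "setting"]):
--         return "config"
--     elif any(kw in filename_lower for kw in ["install", "setup", "deploy"]):
--         return "guide"
--     elif any(kw in filename_lower for kw in ["cli", "command"]):
--         return "cli"
--     elif any(kw in filename_lower for kw in ["channel", "telegram", "whatsapp", "discord"]):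
--         return "channel"
--     else:
--         return "general"
-- ===== SOURCE B (Python) =====
-- _KEYWORDS = [
--     ("error", 0, "error"), ("troubleshoot", 0, "error"), ("fix", 0, "error"),
--     ("config", 1, "config"), ("setting", 1, "config"),
--     ("install", 2, "guide"), ("setup", 2, "guide"), ("deploy", 2, "guide"),
--     ("cli", 3, "cli"), ("command", 3, "cli"),
--     ("channel", 4, "channel"), ("telegram", 4, "channel"),
--     ("whatsapp", 4, "channel"), ("discord", 4, "channel"),
-- ]
--
--
-- def detect_doc_type(filename: str) -> str:
--     # One left-to-right scan: at each text position try to match each keyword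
--     # there, keeping the lowest-priority (= highest-precedence) match seen.
--     s = filename.lower()
--     best_p, best_t = 5, "general"
--     for i in range(len(s)):
--         for kw, p, t in _KEYWORDS:
--             if p < best_p and s.startswith(kw, i):
--                 best_p, best_t = p, t
--     return best_t
-- ===== Notes on version B (the rewrite author's own statement) =====
-- stated objective: alternative
-- what changed: Replaces per-category substring membership tests in an if/elif chain by a single left-to-right scan of the text that matches keywords at each position (startswith) and keeps the minimum-priority match in an accumulator.
import Mathlib
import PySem

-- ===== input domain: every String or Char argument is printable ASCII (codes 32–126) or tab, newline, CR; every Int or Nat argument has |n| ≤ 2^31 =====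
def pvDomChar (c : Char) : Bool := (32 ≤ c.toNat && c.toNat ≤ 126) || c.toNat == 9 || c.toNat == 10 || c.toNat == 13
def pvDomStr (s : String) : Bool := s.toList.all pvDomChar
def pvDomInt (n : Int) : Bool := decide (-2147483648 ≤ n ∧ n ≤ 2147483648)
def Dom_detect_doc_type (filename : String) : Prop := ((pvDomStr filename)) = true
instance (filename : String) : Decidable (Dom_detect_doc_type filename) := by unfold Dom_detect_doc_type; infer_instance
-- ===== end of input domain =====

-- B replaces A's per-category substring tests (if/elif chain of `kw in s`) by a single
-- left-to-right scan matching keywords at each text position, keeping the minimum-priority match.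
-- ===== PORT A =====
def detect_doc_type (filename : String) : String :=
  let filename_lower := PySem.Str.lower filename
  if ["error", "troubleshoot", "fix"].any (fun kw => PySem.Str.isIn kw filename_lower) then "error"
  else if ["config", "setting"].any (fun kw => PySem.Str.isIn kw filename_lower) then "config"
  else if ["install", "setup", "deploy"].any (fun kw => PySem.Str.isIn kw filename_lower) then "guide"
  else if ["cli", "command"].any (fun kw => PySem.Str.isIn kw filename_lower) then "cli"
  else if ["channel", "telegram", "whatsapp", "discord"].any (fun kw => PySem.Str.isIn kw filename_lower) then "channel"
  else "general"

-- ===== PORT B =====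
-- the flat keyword table _KEYWORDS of Source B: (keyword, priority, doc_type)
def pvKEYWORDS : List (String × Nat × String) :=
  [("error", 0, "error"), ("troubleshoot", 0, "error"), ("fix", 0, "error"),
   ("config", 1, "config"), ("setting", 1, "config"),
   ("install", 2, "guide"), ("setup", 2, "guide"), ("deploy", 2, "guide"),
   ("cli", 3, "cli"), ("command", 3, "cli"),
   ("channel", 4, "channel"), ("telegram", 4, "channel"),
   ("whatsapp", 4, "channel"), ("discord", 4, "channel")]

-- Python's s.startswith(kw, i) with 0 ≤ i < len(s) (i from range(len(s))) is exactly
-- PySem.Chars.startswith (s.drop i) kw on the code-point list; range(len(s)) = List.range s.length.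
def detect_doc_type_alt (filename : String) : String :=
  let s := (PySem.Str.lower filename).toList
  let r := (List.range s.length).foldl
    (fun acc i =>
      pvKEYWORDS.foldl
        (fun acc e =>
          if e.2.1 < acc.1 && PySem.Chars.startswith (s.drop i) e.1.toList then
            (e.2.1, e.2.2)
          else acc)
        acc)
    (5, "general")
  r.2

-- ===== PRECONDITION & SPEC =====
def Spec_detect_doc_type (filename : String) (out : String) : Prop := out = detect_doc_type_alt filename
instance (filename : String) (out : String) : Decidable (Spec_detect_doc_type filename out) := by unfold Spec_detect_doc_type; infer_instance

-- ===== CLAIM =====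
def Claim_equal_detect_doc_type : Prop := ∀ (filename : String), Dom_detect_doc_type filename → Spec_detect_doc_type filename (detect_doc_type filename)

-- ===== LEMMAS AND PROOFS =====

-- the doc type assigned to each priority level
def pvTypeOf (p : Nat) : String :=
  if p = 0 then "error" else if p = 1 then "config" else if p = 2 then "guide"
  else if p = 3 then "cli" else if p = 4 then "channel" else "general"

-- the priority-only version of B's inner fold at position i
def pvMin (s : List Char) (i : Nat) (b : Nat) : Nat :=
  pvKEYWORDS.foldl
    (fun b e => if e.2.1 < b && PySem.Chars.startswith (s.drop i) e.1.toList then e.2.1 else b) b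

-- the priority-only version of B's whole double fold
def pvM (s : List Char) : Nat :=
  (List.range s.length).foldl (fun b i => pvMin s i b) 5

-- "some keyword of priority class p occurs in s" — the condition A's p-th branch tests
def pvHas (s : List Char) (p : Nat) : Prop :=
  ∃ e ∈ pvKEYWORDS, e.2.1 = p ∧ e.1.toList <:+: s

-- generic: a min-accumulating fold over pairs never increases the accumulator
theorem pvFoldP_le (c : String → Bool) (L : List (String × Nat × String)) (b : Nat) :
    L.foldl (fun b e => if e.2.1 < b && c e.1 then e.2.1 else b) b ≤ b := by
  induction L generalizing b with
  | nil => simp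
  | cons a L ih =>
    simp only [List.foldl_cons]
    by_cases h : (decide (a.2.1 < b) && c a.1) = true
    · rw [if_pos h]
      have h' := h
      simp only [Bool.and_eq_true, decide_eq_true_eq] at h'
      exact le_trans (ih a.2.1) (le_of_lt h'.1)
    · rw [if_neg h]
      exact ih b

theorem pvFoldP_le_of_mem (c : String → Bool) (L : List (String × Nat × String)) (b : Nat)
    {e : String × Nat × String} (he : e ∈ L) (hc : c e.1 = true) :
    L.foldl (fun b e => if e.2.1 < b && c e.1 then e.2.1 else b) b ≤ e.2.1 := by
  induction L generalizing b with
  | nil => cases he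
  | cons a L ih =>
    simp only [List.foldl_cons]
    rcases List.mem_cons.mp he with rfl | hmem
    · by_cases h : e.2.1 < b
      · rw [if_pos (by simp [h, hc])]
        exact pvFoldP_le c L e.2.1
      · rw [if_neg (by simp [h])]
        exact le_trans (pvFoldP_le c L b) (Nat.le_of_not_lt h)
    · by_cases h : (decide (a.2.1 < b) && c a.1) = true
      · rw [if_pos h]; exact ih a.2.1 hmem
      · rw [if_neg h]; exact ih b hmem

theorem pvFoldP_cases (c : String → Bool) (L : List (String × Nat × String)) (b : Nat) :
    L.foldl (fun b e => if e.2.1 < b && c e.1 then e.2.1 else b) b = b ∨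
      ∃ e ∈ L, c e.1 = true ∧
        L.foldl (fun b e => if e.2.1 < b && c e.1 then e.2.1 else b) b = e.2.1 := by
  induction L generalizing b with
  | nil => left; rfl
  | cons a L ih =>
    simp only [List.foldl_cons]
    by_cases h : (decide (a.2.1 < b) && c a.1) = true
    · rw [if_pos h]
      have h' := h
      simp only [Bool.and_eq_true] at h'
      have h2 := h'.2
      rcases ih a.2.1 with heq | ⟨e, hmem, hce, heq⟩
      · right; exact ⟨a, List.mem_cons_self, h2, heq⟩
      · right; exact ⟨e, List.mem_cons_of_mem _ hmem, hce, heq⟩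
    · rw [if_neg h]
      rcases ih b with heq | ⟨e, hmem, hce, heq⟩
      · left; exact heq
      · right; exact ⟨e, List.mem_cons_of_mem _ hmem, hce, heq⟩

theorem pvMin_le (s : List Char) (i : Nat) (b : Nat) : pvMin s i b ≤ b := by
  unfold pvMin; exact pvFoldP_le (fun kw => PySem.Chars.startswith (s.drop i) kw.toList) pvKEYWORDS b

theorem pvMin_le_of_mem (s : List Char) (i : Nat) (b : Nat)
    {e : String × Nat × String} (he : e ∈ pvKEYWORDS)
    (hc : PySem.Chars.startswith (s.drop i) e.1.toList = true) : pvMin s i b ≤ e.2.1 := by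
  unfold pvMin; exact pvFoldP_le_of_mem (fun kw => PySem.Chars.startswith (s.drop i) kw.toList) pvKEYWORDS b he hc

theorem pvMin_cases (s : List Char) (i : Nat) (b : Nat) :
    pvMin s i b = b ∨ ∃ e ∈ pvKEYWORDS, PySem.Chars.startswith (s.drop i) e.1.toList = true ∧ pvMin s i b = e.2.1 := by
  unfold pvMin; exact pvFoldP_cases (fun kw => PySem.Chars.startswith (s.drop i) kw.toList) pvKEYWORDS b

-- the outer fold never increases the accumulator
theorem pvFoldO_le (s : List Char) (l : List Nat) (b : Nat) :
    l.foldl (fun b i => pvMin s i b) b ≤ b := by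
  induction l generalizing b with
  | nil => simp
  | cons i l ih =>
    simp only [List.foldl_cons]
    exact le_trans (ih (pvMin s i b)) (pvMin_le s i b)

theorem pvFoldO_le_of_mem (s : List Char) (l : List Nat) (b : Nat)
    {i : Nat} (hi : i ∈ l) {e : String × Nat × String} (he : e ∈ pvKEYWORDS)
    (hc : PySem.Chars.startswith (s.drop i) e.1.toList = true) :
    l.foldl (fun b i => pvMin s i b) b ≤ e.2.1 := by
  induction l generalizing b with
  | nil => cases hi
  | cons j l ih =>
    simp only [List.foldl_cons]
    rcases List.mem_cons.mp hi with rfl | hmem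
    · exact le_trans (pvFoldO_le s l _) (pvMin_le_of_mem s i b he hc)
    · exact ih (pvMin s j b) hmem

theorem pvFoldO_cases (s : List Char) (l : List Nat) (b : Nat) :
    l.foldl (fun b i => pvMin s i b) b = b ∨
      ∃ i ∈ l, ∃ e ∈ pvKEYWORDS, PySem.Chars.startswith (s.drop i) e.1.toList = true ∧
        l.foldl (fun b i => pvMin s i b) b = e.2.1 := by
  induction l generalizing b with
  | nil => left; rfl
  | cons j l ih =>
    simp only [List.foldl_cons]
    rcases ih (pvMin s j b) with heq | ⟨i, hmem, e, he, hc, heq⟩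
    · rcases pvMin_cases s j b with h2 | ⟨e, he, hc, h2⟩
      · left; rw [heq]; exact h2
      · right; exact ⟨j, List.mem_cons_self, e, he, hc, by rw [heq]; exact h2⟩
    · right; exact ⟨i, List.mem_cons_of_mem _ hmem, e, he, hc, heq⟩

-- B's pair-valued inner fold tracks (pvMin, pvTypeOf pvMin)
theorem pvPair_inner (s : List Char) (i : Nat)
    (L : List (String × Nat × String)) (hL : ∀ e ∈ L, e.2.2 = pvTypeOf e.2.1) (b : Nat) :
    L.foldl
      (fun acc e =>
        if e.2.1 < acc.1 && PySem.Chars.startswith (s.drop i) e.1.toList then (e.2.1, e.2.2)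
        else acc) (b, pvTypeOf b)
    = (L.foldl (fun b e => if e.2.1 < b && PySem.Chars.startswith (s.drop i) e.1.toList then e.2.1 else b) b,
       pvTypeOf (L.foldl (fun b e => if e.2.1 < b && PySem.Chars.startswith (s.drop i) e.1.toList then e.2.1 else b) b)) := by
  induction L generalizing b with
  | nil => rfl
  | cons a L ih =>
    simp only [List.foldl_cons]
    by_cases h : (decide (a.2.1 < b) && PySem.Chars.startswith (s.drop i) a.1.toList) = true
    · rw [if_pos h, if_pos h, hL a List.mem_cons_self]
      exact ih (fun e he => hL e (List.mem_cons_of_mem _ he)) a.2.1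
    · rw [if_neg h, if_neg h]
      exact ih (fun e he => hL e (List.mem_cons_of_mem _ he)) b

-- B's whole result is pvTypeOf (pvM s)
theorem pvAlt_eq (filename : String) :
    detect_doc_type_alt filename = pvTypeOf (pvM (PySem.Str.lower filename).toList) := by
  unfold detect_doc_type_alt pvM
  have hL : ∀ e ∈ pvKEYWORDS, e.2.2 = pvTypeOf e.2.1 := by decide
  generalize (PySem.Str.lower filename).toList = s
  suffices h : ∀ (l : List Nat) (b : Nat),
      l.foldl
        (fun acc i =>
          pvKEYWORDS.foldl
            (fun acc e =>
              if e.2.1 < acc.1 && PySem.Chars.startswith (s.drop i) e.1.toList then (e.2.1, e.2.2)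
              else acc) acc) (b, pvTypeOf b)
      = (l.foldl (fun b i => pvMin s i b) b, pvTypeOf (l.foldl (fun b i => pvMin s i b) b)) by
    have h5 := h (List.range s.length) 5
    show ((List.range s.length).foldl _ ((5 : Nat), "general")).2 = _
    rw [show ((5 : Nat), "general") = ((5 : Nat), pvTypeOf 5) from rfl, h5]
  intro l
  induction l with
  | nil => intro b; rfl
  | cons j l ih =>
    intro b
    simp only [List.foldl_cons]
    rw [pvPair_inner s j pvKEYWORDS hL b]
    exact ih (pvMin s j b)

-- an occurring keyword of class p bounds pvM by p
theorem pvM_le_of_has (s : List Char) (p : Nat) (h : pvHas s p) : pvM s ≤ p := by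
  rcases h with ⟨e, he, hp, hinf⟩
  have hne : e.1.toList ≠ [] := by
    fin_cases he <;> decide
  rcases hinf with ⟨u, v, huv⟩
  rw [List.append_assoc] at huv
  have hpre : e.1.toList <+: s.drop u.length := by
    rw [← huv, List.drop_left]
    exact ⟨v, rfl⟩
  have hlt : u.length < s.length := by
    by_contra hge
    have hnil : s.drop u.length = [] := List.drop_eq_nil_of_le (Nat.le_of_not_lt hge)
    rw [hnil] at hpre
    exact hne (List.prefix_nil.mp hpre)
  have hc : PySem.Chars.startswith (s.drop u.length) e.1.toList = true :=
    (PySem.Chars.startswith_iff _ _).mpr hpre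
  have hle := pvFoldO_le_of_mem s (List.range s.length) 5 (List.mem_range.mpr hlt) he hc
  rw [← hp]
  unfold pvM
  exact hle

-- pvM is 5 or the priority of an occurring keyword
theorem pvM_cases (s : List Char) : pvM s = 5 ∨ pvHas s (pvM s) := by
  rcases pvFoldO_cases s (List.range s.length) 5 with h | ⟨i, _, e, he, hc, heq⟩
  · left; unfold pvM; exact h
  · right
    refine ⟨e, he, by unfold pvM; exact heq.symm, ?_⟩
    rcases (PySem.Chars.startswith_iff _ _).mp hc with ⟨v, hv⟩
    exact ⟨s.take i, v, by rw [List.append_assoc, hv, List.take_append_drop]⟩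

theorem pvM_le_five (s : List Char) : pvM s ≤ 5 := by
  unfold pvM; exact pvFoldO_le s _ 5

-- if pvHas fails at p < 5, pvM avoids p
theorem pvM_ne (s : List Char) (p : Nat) (hp : p < 5) (h : ¬ pvHas s p) : pvM s ≠ p := by
  intro hEq
  rcases pvM_cases s with h5 | hhas
  · omega
  · rw [hEq] at hhas; exact h hhas

-- A's p-th branch condition, rephrased as pvHas
theorem pvCond0 (f : String) :
    (["error", "troubleshoot", "fix"].any (fun kw => PySem.Str.isIn kw (PySem.Str.lower f))) = true
      ↔ pvHas (PySem.Str.lower f).toList 0 := by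
  simp only [List.any_cons, List.any_nil, Bool.or_false, Bool.or_eq_true, PySem.Str.isIn_iff_infix]
  constructor
  · rintro (h | h | h)
    · exact ⟨("error", 0, "error"), by decide, rfl, h⟩
    · exact ⟨("troubleshoot", 0, "error"), by decide, rfl, h⟩
    · exact ⟨("fix", 0, "error"), by decide, rfl, h⟩
  · rintro ⟨e, he, hp, hinf⟩
    fin_cases he <;> simp_all

theorem pvCond1 (f : String) :
    (["config", "setting"].any (fun kw => PySem.Str.isIn kw (PySem.Str.lower f))) = true
      ↔ pvHas (PySem.Str.lower f).toList 1 := by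
  simp only [List.any_cons, List.any_nil, Bool.or_false, Bool.or_eq_true, PySem.Str.isIn_iff_infix]
  constructor
  · rintro (h | h)
    · exact ⟨("config", 1, "config"), by decide, rfl, h⟩
    · exact ⟨("setting", 1, "config"), by decide, rfl, h⟩
  · rintro ⟨e, he, hp, hinf⟩
    fin_cases he <;> simp_all

theorem pvCond2 (f : String) :
    (["install", "setup", "deploy"].any (fun kw => PySem.Str.isIn kw (PySem.Str.lower f))) = true
      ↔ pvHas (PySem.Str.lower f).toList 2 := by
  simp only [List.any_cons, List.any_nil, Bool.or_false, Bool.or_eq_true, PySem.Str.isIn_iff_infix]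
  constructor
  · rintro (h | h | h)
    · exact ⟨("install", 2, "guide"), by decide, rfl, h⟩
    · exact ⟨("setup", 2, "guide"), by decide, rfl, h⟩
    · exact ⟨("deploy", 2, "guide"), by decide, rfl, h⟩
  · rintro ⟨e, he, hp, hinf⟩
    fin_cases he <;> simp_all

theorem pvCond3 (f : String) :
    (["cli", "command"].any (fun kw => PySem.Str.isIn kw (PySem.Str.lower f))) = true
      ↔ pvHas (PySem.Str.lower f).toList 3 := by
  simp only [List.any_cons, List.any_nil, Bool.or_false, Bool.or_eq_true, PySem.Str.isIn_iff_infix]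
  constructor
  · rintro (h | h)
    · exact ⟨("cli", 3, "cli"), by decide, rfl, h⟩
    · exact ⟨("command", 3, "cli"), by decide, rfl, h⟩
  · rintro ⟨e, he, hp, hinf⟩
    fin_cases he <;> simp_all

theorem pvCond4 (f : String) :
    (["channel", "telegram", "whatsapp", "discord"].any (fun kw => PySem.Str.isIn kw (PySem.Str.lower f))) = true
      ↔ pvHas (PySem.Str.lower f).toList 4 := by
  simp only [List.any_cons, List.any_nil, Bool.or_false, Bool.or_eq_true, PySem.Str.isIn_iff_infix]
  constructor
  · rintro (h | h | h | h)
    · exact ⟨("channel", 4, "channel"), by decide, rfl, h⟩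
    · exact ⟨("telegram", 4, "channel"), by decide, rfl, h⟩
    · exact ⟨("whatsapp", 4, "channel"), by decide, rfl, h⟩
    · exact ⟨("discord", 4, "channel"), by decide, rfl, h⟩
  · rintro ⟨e, he, hp, hinf⟩
    fin_cases he <;> simp_all

-- ===== VERDICT =====
theorem detect_doc_type_spec : Claim_equal_detect_doc_type := by
  intro filename _
  unfold Spec_detect_doc_type
  rw [pvAlt_eq]
  simp only [detect_doc_type]
  by_cases h0 : pvHas (PySem.Str.lower filename).toList 0
  · rw [if_pos ((pvCond0 filename).mpr h0)]
    rw [Nat.le_zero.mp (pvM_le_of_has _ 0 h0)]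
    rfl
  · rw [if_neg (fun hc => h0 ((pvCond0 filename).mp hc))]
    have hn0 := pvM_ne _ 0 (by omega) h0
    by_cases h1 : pvHas (PySem.Str.lower filename).toList 1
    · rw [if_pos ((pvCond1 filename).mpr h1)]
      have hle := pvM_le_of_has _ 1 h1
      have : pvM (PySem.Str.lower filename).toList = 1 := by omega
      rw [this]; rfl
    · rw [if_neg (fun hc => h1 ((pvCond1 filename).mp hc))]
      have hn1 := pvM_ne _ 1 (by omega) h1
      by_cases h2 : pvHas (PySem.Str.lower filename).toList 2
      · rw [if_pos ((pvCond2 filename).mpr h2)]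
        have hle := pvM_le_of_has _ 2 h2
        have : pvM (PySem.Str.lower filename).toList = 2 := by omega
        rw [this]; rfl
      · rw [if_neg (fun hc => h2 ((pvCond2 filename).mp hc))]
        have hn2 := pvM_ne _ 2 (by omega) h2
        by_cases h3 : pvHas (PySem.Str.lower filename).toList 3
        · rw [if_pos ((pvCond3 filename).mpr h3)]
          have hle := pvM_le_of_has _ 3 h3
          have : pvM (PySem.Str.lower filename).toList = 3 := by omega
          rw [this]; rfl
        · rw [if_neg (fun hc => h3 ((pvCond3 filename).mp hc))]
          have hn3 := pvM_ne _ 3 (by omega) h3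
          by_cases h4 : pvHas (PySem.Str.lower filename).toList 4
          · rw [if_pos ((pvCond4 filename).mpr h4)]
            have hle := pvM_le_of_has _ 4 h4
            have : pvM (PySem.Str.lower filename).toList = 4 := by omega
            rw [this]; rfl
          · rw [if_neg (fun hc => h4 ((pvCond4 filename).mp hc))]
            have hn4 := pvM_ne _ 4 (by omega) h4
            have h5 := pvM_le_five (PySem.Str.lower filename).toList
            have : pvM (PySem.Str.lower filename).toList = 5 := by omega
            rw [this]; rfl
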